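-- pv_equiv track=rewrite | github.com/Verkassi/advent-calendar-2021 | solutions/yr_2023/december_2/solver.py | calculate_possible_games
-- ===== SOURCE A (Python) =====
-- def calculate_possible_games(games: dict, bag_content: dict):
--     possible_games = list()
--     for game_number, grabs in games.items():
--         is_possible = True
--         for grab in grabs:
--             for grabbed_color, amount in grab.items():
--                 if amount > bag_content[grabbed_color]:
--                     is_possible = False
--         if is_possible:
--             possible_games.append(game_number)
--     return possible_games
-- ===== SOURCE B (Python) =====
-- def calculate_possible_games(games: dict, bag_content: dict):
--     possible_games = []
--     for game_number, grabs in games.items():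
--         maxes = {}
--         for grab in grabs:
--             for color, amount in grab.items():
--                 maxes[color] = max(maxes.get(color, amount), amount)
--         if all(m <= bag_content[color] for color, m in maxes.items()):
--             possible_games.append(game_number)
--     return possible_games
-- ===== Notes on version B (the rewrite author's own statement) =====
-- stated objective: alternative
-- what changed: B first folds each game's grabs into a dict of the maximum amount seen per color (the minimum required bag) and then decides feasibility in a separate comparison pass over that dict, instead of A's inline per-item boolean flag threaded through the nested loops.
import Mathlib
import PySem

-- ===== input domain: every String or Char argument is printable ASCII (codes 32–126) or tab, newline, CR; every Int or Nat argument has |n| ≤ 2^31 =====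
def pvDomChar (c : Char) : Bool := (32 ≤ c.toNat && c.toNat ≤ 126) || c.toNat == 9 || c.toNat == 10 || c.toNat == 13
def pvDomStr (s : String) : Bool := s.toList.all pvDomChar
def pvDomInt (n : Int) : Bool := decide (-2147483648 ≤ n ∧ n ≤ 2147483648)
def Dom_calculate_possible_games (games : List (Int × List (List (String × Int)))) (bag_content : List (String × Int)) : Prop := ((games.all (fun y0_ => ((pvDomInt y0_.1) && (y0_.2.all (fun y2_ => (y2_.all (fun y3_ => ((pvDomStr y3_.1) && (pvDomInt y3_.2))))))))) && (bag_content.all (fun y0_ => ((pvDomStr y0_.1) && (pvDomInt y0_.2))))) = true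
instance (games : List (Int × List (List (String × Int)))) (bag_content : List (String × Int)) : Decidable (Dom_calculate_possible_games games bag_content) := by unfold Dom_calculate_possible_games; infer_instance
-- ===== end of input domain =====

-- B replaces A's inline per-item feasibility flag by a per-game dict of maximum amounts, compared with the bag in a separate pass (alternative decomposition, same cost); equivalence is claimed under Pre_, which excludes exactly the inputs on which A raises KeyError.

-- ===== PORT A =====
-- bag_content[c]: dict lookup (first match in the association list); raises KeyError in Python
-- when c is absent — Pre_ excludes those inputs, so the default 0 is never read on admitted inputs.
def pvBagD (bag_content : List (String × Int)) (c : String) : Int :=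
  (PySem.Dict.mk bag_content).getD c 0

def calculate_possible_games (games : List (Int × List (List (String × Int)))) (bag_content : List (String × Int)) : List Int :=
  games.foldl (fun possible_games g =>
    let is_possible : Bool :=
      g.2.foldl (fun ip grab =>
        grab.foldl (fun ip p =>
          if p.2 > pvBagD bag_content p.1 then false else ip) ip) true
    if is_possible then possible_games ++ [g.1] else possible_games) []

-- ===== PORT B =====
-- maxes[color] = max(maxes.get(color, amount), amount), folded over all grabs of one game
def pvMaxes (grabs : List (List (String × Int))) : PySem.Dict String Int :=
  grabs.foldl (fun maxes grab =>
    grab.foldl (fun maxes p =>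
      maxes.insert p.1 (max (maxes.getD p.1 p.2) p.2)) maxes) PySem.Dict.empty

def calculate_possible_games_alt (games : List (Int × List (List (String × Int)))) (bag_content : List (String × Int)) : List Int :=
  games.foldl (fun possible_games g =>
    if (pvMaxes g.2).items.all (fun p => decide (p.2 ≤ pvBagD bag_content p.1)) then
      possible_games ++ [g.1]
    else possible_games) []

-- ===== PRECONDITION & SPEC =====
-- Pre_ excludes exactly the inputs on which Python A raises KeyError: some grabbed color
-- is not a key of bag_content (A looks every grabbed color up, even after the flag is false).
def Pre_calculate_possible_games (games : List (Int × List (List (String × Int)))) (bag_content : List (String × Int)) : Prop :=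
  (games.all (fun g => g.2.all (fun grab => grab.all (fun p =>
    (PySem.Dict.mk bag_content).contains p.1)))) = true
instance (games : List (Int × List (List (String × Int)))) (bag_content : List (String × Int)) : Decidable (Pre_calculate_possible_games games bag_content) := by unfold Pre_calculate_possible_games; infer_instance
def pvWitness_calculate_possible_games : (List (Int × List (List (String × Int)))) × (List (String × Int)) :=
  ([(1, [[("red", 2)], [("red", 1), ("blue", 3)]]), (2, [[("blue", 9)]])], [("red", 4), ("blue", 4)])
def Spec_calculate_possible_games (games : List (Int × List (List (String × Int)))) (bag_content : List (String × Int)) (out : List Int) : Prop := out = calculate_possible_games_alt games bag_content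
instance (games : List (Int × List (List (String × Int)))) (bag_content : List (String × Int)) (out : List Int) : Decidable (Spec_calculate_possible_games games bag_content out) := by unfold Spec_calculate_possible_games; infer_instance

-- ===== CLAIM (what is proved, stated in full; the proofs are below) =====
def Claim_equal_calculate_possible_games : Prop := ∀ (games : List (Int × List (List (String × Int)))) (bag_content : List (String × Int)), Dom_calculate_possible_games games bag_content → Pre_calculate_possible_games games bag_content → Spec_calculate_possible_games games bag_content (calculate_possible_games games bag_content)

-- ===== LEMMAS AND PROOFS =====

-- A's innermost loop: threading the flag through one grab is an `&&` with "all items fit".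
theorem pv_innerA (b : String → Int) (l : List (String × Int)) (ip : Bool) :
    l.foldl (fun ip p => if p.2 > b p.1 then false else ip) ip
      = (ip && l.all (fun p => decide (p.2 ≤ b p.1))) := by
  induction l generalizing ip with
  | nil => simp
  | cons x l ih =>
    rw [List.foldl_cons, ih, List.all_cons]
    by_cases h : x.2 > b x.1
    · simp [h, not_le.mpr h]
    · simp [h, not_lt.mp h]

-- A's middle loop over the grabs of one game.
theorem pv_outerA (b : String → Int) (gs : List (List (String × Int))) (ip : Bool) :
    gs.foldl (fun ip grab => grab.foldl (fun ip p => if p.2 > b p.1 then false else ip) ip) ip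
      = (ip && gs.all (fun grab => grab.all (fun p => decide (p.2 ≤ b p.1)))) := by
  induction gs generalizing ip with
  | nil => simp
  | cons g gs ih =>
    rw [List.foldl_cons, ih, pv_innerA, List.all_cons, Bool.and_assoc]

-- One max-update step: "all dict entries fit" absorbs the new item as an `&&`.
theorem pv_stepB (b : String → Int) (d : PySem.Dict String Int) (hn : d.keys.Nodup)
    (c : String) (a : Int) :
    (d.insert c (max (d.getD c a) a)).items.all (fun p => decide (p.2 ≤ b p.1))
      = (d.items.all (fun p => decide (p.2 ≤ b p.1)) && decide (a ≤ b c)) := by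
  apply Bool.eq_iff_iff.mpr
  simp only [List.all_eq_true, Bool.and_eq_true, decide_eq_true_eq,
    PySem.Dict.mem_items_insert]
  constructor
  · intro h
    have hw : max (d.getD c a) a ≤ b c := h (c, max (d.getD c a) a) (Or.inl rfl)
    refine ⟨fun p hp => ?_, le_trans (le_max_right _ _) hw⟩
    obtain ⟨k, v⟩ := p
    by_cases hc : k = c
    · subst hc
      have hget : d.getD k a = v := PySem.Dict.getD_of_mem_items _ hp hn a
      calc v = d.getD k a := hget.symm
        _ ≤ max (d.getD k a) a := le_max_left _ _
        _ ≤ b k := hw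
    · exact h (k, v) (Or.inr ⟨hp, hc⟩)
  · rintro ⟨hall, ha⟩ p (rfl | ⟨hp, _⟩)
    · refine max_le ?_ ha
      rcases hq : (d.get? c) with _ | v
      · rw [PySem.Dict.getD_eq_get?_getD, hq]; exact ha
      · rw [PySem.Dict.getD_eq_get?_getD, hq]
        exact hall (c, v) (PySem.Dict.mem_items_of_get?_eq_some _ hq)
    · exact hall p hp

-- Folding one grab into the maxes dict.
theorem pv_foldB (b : String → Int) (l : List (String × Int)) (d : PySem.Dict String Int)
    (hn : d.keys.Nodup) :
    ((l.foldl (fun maxes p => maxes.insert p.1 (max (maxes.getD p.1 p.2) p.2)) d).items.all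
        (fun p => decide (p.2 ≤ b p.1)))
      = (d.items.all (fun p => decide (p.2 ≤ b p.1)) && l.all (fun p => decide (p.2 ≤ b p.1))) := by
  induction l generalizing d with
  | nil => simp
  | cons x l ih =>
    rw [List.foldl_cons, ih _ (PySem.Dict.nodup_keys_insert _ _ _ hn),
      pv_stepB b d hn, List.all_cons, Bool.and_assoc]

theorem pv_nodup_foldB (l : List (String × Int)) (d : PySem.Dict String Int)
    (hn : d.keys.Nodup) :
    (l.foldl (fun maxes p => maxes.insert p.1 (max (maxes.getD p.1 p.2) p.2)) d).keys.Nodup := by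
  induction l generalizing d with
  | nil => exact hn
  | cons x l ih => exact ih _ (PySem.Dict.nodup_keys_insert _ _ _ hn)

-- The whole maxes dict of one game fits the bag iff every grabbed item fits.
theorem pv_maxes_all (b : String → Int) (gs : List (List (String × Int))) :
    (pvMaxes gs).items.all (fun p => decide (p.2 ≤ b p.1))
      = gs.all (fun grab => grab.all (fun p => decide (p.2 ≤ b p.1))) := by
  suffices h : ∀ (d : PySem.Dict String Int), d.keys.Nodup →
      ((gs.foldl (fun maxes grab =>
          grab.foldl (fun maxes p => maxes.insert p.1 (max (maxes.getD p.1 p.2) p.2)) maxes) d).items.all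
        (fun p => decide (p.2 ≤ b p.1)))
      = (d.items.all (fun p => decide (p.2 ≤ b p.1))
          && gs.all (fun grab => grab.all (fun p => decide (p.2 ≤ b p.1)))) by
    have := h PySem.Dict.empty PySem.Dict.nodup_keys_empty
    simpa [pvMaxes] using this
  induction gs with
  | nil => intro d _; simp
  | cons g gs ih =>
    intro d hn
    rw [List.foldl_cons, ih _ (pv_nodup_foldB g d hn), pv_foldB b g d hn,
      List.all_cons, Bool.and_assoc]

-- ===== VERDICT (by name: the statement is the Claim_ definition above) =====
theorem calculate_possible_games_spec : Claim_equal_calculate_possible_games := by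
  intro games bag_content _ _
  unfold Spec_calculate_possible_games calculate_possible_games calculate_possible_games_alt
  have hcond : ∀ g : Int × List (List (String × Int)),
      (g.2.foldl (fun ip grab =>
        grab.foldl (fun ip p => if p.2 > pvBagD bag_content p.1 then false else ip) ip) true)
      = (pvMaxes g.2).items.all (fun p => decide (p.2 ≤ pvBagD bag_content p.1)) := by
    intro g
    rw [pv_outerA, pv_maxes_all, Bool.true_and]
  induction games using List.reverseRecOn with
  | nil => rfl
  | append_singleton gs g ih =>
    simp only [List.foldl_append, List.foldl_cons, List.foldl_nil, hcond]
    try rw [ih]
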